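-- pv_equiv track=rewrite | github.com/Dracolightning08/wordleAI | wordleAI-Test/twinsnakes.py | are_indices_unique
-- ===== SOURCE A (Python) =====
-- def are_indices_unique(word, indices):
--     """
--     Check if a list of indices are unique within the word.
--
--     Args:
--     - word (str): The input word.
--     - indices (list of int): List of indices to check for uniqueness.
--
--     Returns:
--     - bool: True if all indices are unique, False otherwise.
--     """
--     if not indices:
--         return False  # Empty list of indices
--
--     for index in indices:
--         if index < 0 or index >= len(word):
--             return False  # Index out of range
--
--     char_counts = {}
--     for index in indices:
--         char = word[index]
--         if char in char_counts:
--             char_counts[char] += 1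
--         else:
--             char_counts[char] = 1
--
--     return all(count == 1 for count in char_counts.values())
-- ===== SOURCE B (Python) =====
-- def are_indices_unique(word, indices):
--     if not indices:
--         return False  # Empty list of indices
--
--     for index in indices:
--         if index < 0 or index >= len(word):
--             return False  # Index out of range
--
--     chars = sorted(word[index] for index in indices)
--     for a, b in zip(chars, chars[1:]):
--         if a == b:
--             return False
--     return True
-- ===== Notes on version B (the rewrite author's own statement) =====
-- stated objective: alternative
-- what changed: The counting dict followed by an all-counts-equal-1 check is replaced by sorting the selected characters once and scanning adjacent pairs for an equal neighbour.
import Mathlib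
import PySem

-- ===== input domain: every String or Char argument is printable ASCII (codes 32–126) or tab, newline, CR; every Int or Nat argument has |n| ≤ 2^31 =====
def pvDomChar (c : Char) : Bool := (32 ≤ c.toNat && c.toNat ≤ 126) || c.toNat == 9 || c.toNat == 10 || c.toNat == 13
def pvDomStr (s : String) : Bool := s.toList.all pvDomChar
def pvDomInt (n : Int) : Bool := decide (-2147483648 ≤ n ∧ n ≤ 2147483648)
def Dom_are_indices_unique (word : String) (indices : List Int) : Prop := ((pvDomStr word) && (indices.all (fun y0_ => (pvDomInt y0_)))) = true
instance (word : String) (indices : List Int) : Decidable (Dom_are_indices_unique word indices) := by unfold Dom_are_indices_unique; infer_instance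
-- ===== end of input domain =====

-- B replaces A's counting dict + all-counts-equal-1 check by sorting the selected
-- characters and scanning adjacent pairs; same return value on every input.

-- ===== PORT A =====
def are_indices_unique (word : String) (indices : List Int) : Bool :=
  if indices = [] then false
  else if indices.any (fun index => decide (index < 0) || decide (PySem.Str.len word ≤ index)) then false
  else
    let char_counts := indices.foldl (fun d index =>
      let char := PySem.List.pyGetD word.toList index ' '
      if d.contains char then d.insert char (d.getD char 0 + 1)
      else d.insert char (1 : Int)) PySem.Dict.empty
    char_counts.values.all (fun count => count == 1)

-- ===== PORT B =====
-- the zip(chars, chars[1:]) adjacent-pair scan of Source B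
def adjacentDistinct : List Char → Bool
  | [] => true
  | [_] => true
  | a :: b :: t => if a = b then false else adjacentDistinct (b :: t)

def are_indices_unique_alt (word : String) (indices : List Int) : Bool :=
  if indices = [] then false
  else if indices.any (fun index => decide (index < 0) || decide (PySem.Str.len word ≤ index)) then false
  else
    adjacentDistinct (PySem.List.sorted
      (indices.map (fun index => PySem.List.pyGetD word.toList index ' ')) (fun c => c) false)

-- ===== PRECONDITION & SPEC =====
def Spec_are_indices_unique (word : String) (indices : List Int) (out : Bool) : Prop := out = are_indices_unique_alt word indices
instance (word : String) (indices : List Int) (out : Bool) : Decidable (Spec_are_indices_unique word indices out) := by unfold Spec_are_indices_unique; infer_instance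

-- ===== CLAIM (what is proved, stated in full; the proofs are below) =====
def Claim_equal_are_indices_unique : Prop := ∀ (word : String) (indices : List Int), Dom_are_indices_unique word indices → Spec_are_indices_unique word indices (are_indices_unique word indices)

-- ===== LEMMAS AND PROOFS =====

-- A's dict-building step is pointwise the standard counter-by-insert step
lemma stepA_eq (d : PySem.Dict Char Int) (c : Char) :
    (if d.contains c then d.insert c (d.getD c 0 + 1) else d.insert c (1 : Int))
      = d.insert c (d.getD c 0 + 1) := by
  by_cases h : d.contains c = true
  · simp [h]
  · simp only [Bool.not_eq_true] at h
    simp [h, PySem.Dict.getD_of_not_contains d 0 h]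

-- A's final check over the counter equals Nodup of the character list
lemma valuesAllOne (l : List Char) :
    ((l.foldl (fun d c => if d.contains c then d.insert c (d.getD c 0 + 1)
        else d.insert c (1 : Int)) PySem.Dict.empty).values.all (fun count => count == 1))
      = decide l.Nodup := by
  have hf : (l.foldl (fun d c => if d.contains c then d.insert c (d.getD c 0 + 1)
        else d.insert c (1 : Int)) PySem.Dict.empty)
      = l.foldl (fun d c => d.insert c (d.getD c 0 + 1)) PySem.Dict.empty := by
    congr 1
    funext d c
    exact stepA_eq d c
  rw [hf, PySem.Dict.foldl_insert_getD_add_one_eq_counter]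
  have hv : (PySem.Dict.counter l).values
      = (PySem.Set.ofList l).map (fun k => (l.count k : Int)) := by
    simp only [PySem.Dict.values, PySem.Dict.items_counter, List.map_map]
    rfl
  rw [hv, List.all_map]
  by_cases h : l.Nodup
  · simp only [h, decide_true]
    apply List.all_eq_true.mpr
    intro c hc
    have hm : c ∈ l := (PySem.Set.mem_ofList _ _).mp hc
    have := List.nodup_iff_count_eq_one.mp h c hm
    simp [Function.comp, this]
  · simp only [h, decide_false]
    apply Bool.not_eq_true _ |>.mp
    intro hall
    apply h
    apply List.nodup_iff_count_eq_one.mpr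
    intro a ha
    have := List.all_eq_true.mp hall a ((PySem.Set.mem_ofList _ _).mpr ha)
    simpa using this

-- adjacentDistinct is the adjacent-pairs-distinct (IsChain (≠)) predicate
lemma adjacentDistinct_eq_chain (l : List Char) :
    adjacentDistinct l = true ↔ List.IsChain (· ≠ ·) l := by
  induction l with
  | nil => simp [adjacentDistinct]
  | cons a t ih =>
    cases t with
    | nil => simp [adjacentDistinct]
    | cons b t' =>
      by_cases h : a = b
      · simp [adjacentDistinct, h, List.isChain_cons_cons]
      · simp [adjacentDistinct, h, List.isChain_cons_cons, ih]

lemma chain_lt_of_le_ne (l : List Char)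
    (h1 : List.IsChain (· ≤ ·) l) (h2 : List.IsChain (· ≠ ·) l) :
    List.IsChain (· < ·) l := by
  induction l with
  | nil => simp
  | cons a t ih =>
    cases t with
    | nil => simp
    | cons b t' =>
      rw [List.isChain_cons_cons] at h1 h2 ⊢
      exact ⟨lt_of_le_of_ne h1.1 h2.1, ih h1.2 h2.2⟩

-- B's scan of the sorted characters equals Nodup of the character list
lemma adjacentDistinct_sorted (l : List Char) :
    adjacentDistinct (PySem.List.sorted l (fun c => c) false) = decide l.Nodup := by
  set s := PySem.List.sorted l (fun c => c) false with hs
  have hperm : s.Perm l := PySem.List.sorted_perm l _ _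
  have hle : List.IsChain (· ≤ ·) s :=
    (PySem.List.sorted_pairwise l (fun c => c)).isChain
  by_cases h : l.Nodup
  · have hnd : s.Nodup := hperm.nodup_iff.mpr h
    simp [h, (adjacentDistinct_eq_chain s).mpr hnd.isChain]
  · simp only [h, decide_false]
    apply Bool.not_eq_true _ |>.mp
    intro had
    apply h
    have hch := (adjacentDistinct_eq_chain s).mp had
    have hlt := chain_lt_of_le_ne s hle hch
    have hp : s.Pairwise (· < ·) := List.isChain_iff_pairwise.mp hlt
    exact hperm.nodup_iff.mp (hp.imp ne_of_lt)

-- ===== VERDICT (by name: the statement is the Claim_ definition above) =====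
theorem are_indices_unique_spec : Claim_equal_are_indices_unique := by
  intro word indices _
  unfold Spec_are_indices_unique are_indices_unique are_indices_unique_alt
  by_cases h0 : indices = []
  · simp [h0]
  · rw [if_neg h0, if_neg h0]
    by_cases h1 : indices.any (fun index => decide (index < 0) || decide (PySem.Str.len word ≤ index)) = true
    · rw [if_pos h1, if_pos h1]
    · rw [if_neg h1, if_neg h1]
      rw [adjacentDistinct_sorted, ← valuesAllOne]
      simp only [List.foldl_map]
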